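-- pv_equiv track=rewrite | github.com/artheadsweden/aoc-22 | dec05/dec05.py | create_stacks_procedures
-- ===== SOURCE A (Python) =====
-- def create_stacks_procedures(data):
--     sep = [i for i, v in enumerate(data) if v == ""][0]
--
--     crates = data[: sep - 1][::-1]
--     procedures = data[sep + 1 :]
--     stack_num = max(map(int, data[sep - 1].split()))
--     stacks = [[] for _ in range(stack_num + 1)]
--     for line in crates:
--         items = [line[i] for i in range(1, len(line), 4)]
--         for i, value in enumerate(items):
--             if value != " ":
--                 stacks[i + 1].append(value)
--     return stacks, procedures, stack_num
-- ===== SOURCE B (Python) =====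
-- def _column(crates, pos):
--     return [line[pos] for line in crates if pos < len(line) and line[pos] != " "]
--
--
-- def create_stacks_procedures(data):
--     sep = data.index("")
--     crates = data[: sep - 1][::-1]
--     procedures = data[sep + 1 :]
--     stack_num = max(int(tok) for tok in data[sep - 1].split())
--     stacks = [[] for _ in range(stack_num + 1)]
--     for k in range(1, stack_num + 1):
--         stacks[k] = _column(crates, 4 * k - 3)
--     return stacks, procedures, stack_num
-- ===== Notes on version B (the rewrite author's own statement) =====
-- stated objective: alternative
-- what changed: B fills the stacks column-major: each stack is built in one comprehension over the reversed crate lines at its fixed character column, instead of A's row-major loop that walks every line's items and appends them one by one into the stack list.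
import Mathlib
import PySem

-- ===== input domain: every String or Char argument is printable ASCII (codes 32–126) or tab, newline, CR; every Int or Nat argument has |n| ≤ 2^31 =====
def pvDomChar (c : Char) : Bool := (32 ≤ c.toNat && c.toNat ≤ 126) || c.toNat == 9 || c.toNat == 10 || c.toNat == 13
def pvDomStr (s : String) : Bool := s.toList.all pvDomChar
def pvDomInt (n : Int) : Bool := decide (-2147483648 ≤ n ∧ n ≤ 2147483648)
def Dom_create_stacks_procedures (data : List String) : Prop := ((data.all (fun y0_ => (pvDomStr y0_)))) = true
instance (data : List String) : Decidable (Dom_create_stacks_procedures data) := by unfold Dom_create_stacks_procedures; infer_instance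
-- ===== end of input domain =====

-- B builds the crate stacks column-major (one pass per stack index over the reversed crate
-- lines) instead of A's row-major fill of a pre-allocated list of stacks; same cost, different
-- decomposition (objective: alternative).

-- ===== PORT A =====

-- stacks[i].append(v): out-of-range i is ignored here (Python raises IndexError there; outside Pre_)
def pvAppendAt : List (List String) → Nat → String → List (List String)
  | [], _, _ => []
  | h :: t, 0, v => (h ++ [v]) :: t
  | h :: t, n+1, v => h :: pvAppendAt t n v

-- line[i] as a one-character string (i always in range where A uses it)
def pvCharAt (line : String) (i : Int) : String :=
  match PySem.Str.pyGet? line i with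
  | some c => String.ofList [c]
  | none => " "

-- items = [line[i] for i in range(1, len(line), 4)]
def pvItems (line : String) : List String :=
  (PySem.List.pyRange 1 (PySem.Str.len line) 4).map (fun i => pvCharAt line i)

def create_stacks_procedures (data : List String) : List (List String) × List String × Int :=
  let seps := ((PySem.List.enumerate data).filter (fun p => p.2 == "")).map (fun p => p.1)
  match PySem.List.pyGet? seps 0 with
  | none => ([], [], 0)          -- Python: IndexError (no blank line); outside Pre_
  | some sep =>
    let crates := (PySem.List.slice data none (some (sep - 1))).reverse
    let procedures := PySem.List.slice data (some (sep + 1)) none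
    match PySem.List.pyGet? data (sep - 1) with
    | none => ([], [], 0)        -- unreachable: data ≠ [] whenever a blank line was found
    | some numline =>
      match (PySem.Str.split₀ numline).mapM PySem.Int.ofStr? with
      | none => ([], [], 0)      -- Python: ValueError from int(); outside Pre_
      | some nums =>
        match PySem.List.max? nums (fun x => x) with
        | none => ([], [], 0)    -- Python: ValueError, max() of empty; outside Pre_
        | some stack_num =>
          let stks0 := (PySem.List.pyRange 0 (stack_num + 1) 1).map (fun _ => ([] : List String))
          let stks := crates.foldl (fun st line =>
            (PySem.List.enumerate (pvItems line)).foldl (fun st p =>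
              if p.2 ≠ " " then pvAppendAt st (p.1 + 1).toNat p.2 else st) st) stks0
          (stks, procedures, stack_num)

-- ===== PORT B =====

-- _column(crates, pos) = [line[pos] for line in crates if pos < len(line) and line[pos] != " "]
def pvColumn (crates : List String) (pos : Int) : List String :=
  crates.filterMap (fun line =>
    if pos < PySem.Str.len line then
      match PySem.Str.pyGet? line pos with
      | some c => if c ≠ ' ' then some (String.ofList [c]) else none
      | none => none
    else none)

def create_stacks_procedures_alt (data : List String) : List (List String) × List String × Int :=
  match PySem.List.index? data "" with
  | none => ([], [], 0)          -- Python: ValueError from data.index(""); outside Pre_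
  | some sep0 =>
    let sep : Int := (sep0 : Int)
    let crates := (PySem.List.slice data none (some (sep - 1))).reverse
    let procedures := PySem.List.slice data (some (sep + 1)) none
    match PySem.List.pyGet? data (sep - 1) with
    | none => ([], [], 0)        -- unreachable
    | some numline =>
      match (PySem.Str.split₀ numline).mapM PySem.Int.ofStr? with
      | none => ([], [], 0)      -- Python: ValueError; outside Pre_
      | some nums =>
        match PySem.List.max? nums (fun x => x) with
        | none => ([], [], 0)    -- Python: ValueError; outside Pre_
        | some stack_num =>
          let stks0 := (PySem.List.pyRange 0 (stack_num + 1) 1).map (fun _ => ([] : List String))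
          let stks := (PySem.List.pyRange 1 (stack_num + 1) 1).foldl
            (fun st k => st.set k.toNat (pvColumn crates (4 * k - 3))) stks0
          (stks, procedures, stack_num)

-- ===== PRECONDITION & SPEC =====

-- Pre_ admits exactly the inputs on which Python A returns normally: a blank line exists, the
-- line before it holds at least one int() token, and every crate-column index the crate lines
-- reach at or beyond the announced stack count carries a space (otherwise stacks[i+1] raises
-- IndexError in A).
def pvPre (data : List String) : Bool :=
  match PySem.List.index? data "" with
  | none => false
  | some sep0 =>
    match PySem.List.pyGet? data ((sep0 : Int) - 1) with
    | none => false
    | some numline =>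
      match (PySem.Str.split₀ numline).mapM PySem.Int.ofStr? with
      | none => false
      | some nums =>
        match PySem.List.max? nums (fun x => x) with
        | none => false
        | some m =>
          (PySem.List.slice data none (some ((sep0 : Int) - 1))).all (fun line =>
            (PySem.List.pyRange (4 * (max m 0) + 1) (PySem.Str.len line) 4).all (fun p =>
              ((PySem.Str.pyGet? line p).getD ' ') == ' '))

def Pre_create_stacks_procedures (data : List String) : Prop := pvPre data = true
instance (data : List String) : Decidable (Pre_create_stacks_procedures data) := by
  unfold Pre_create_stacks_procedures; infer_instance

def pvWitness_create_stacks_procedures : List String :=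
  ["[A]", " 1 ", "", "move 1 from 1 to 1"]

def Spec_create_stacks_procedures (data : List String) (out : List (List String) × List String × Int) : Prop := out = create_stacks_procedures_alt data
instance (data : List String) (out : List (List String) × List String × Int) : Decidable (Spec_create_stacks_procedures data out) := by unfold Spec_create_stacks_procedures; infer_instance

-- ===== CLAIM (what is proved, stated in full; the proofs are below) =====
def Claim_equal_create_stacks_procedures : Prop := ∀ (data : List String), Dom_create_stacks_procedures data → Pre_create_stacks_procedures data → Spec_create_stacks_procedures data (create_stacks_procedures data)

-- ===== LEMMAS AND PROOFS =====

theorem pv_witness_ok :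
    Dom_create_stacks_procedures pvWitness_create_stacks_procedures ∧
    Pre_create_stacks_procedures pvWitness_create_stacks_procedures := by
  constructor <;> decide

-- the first element of A's list comprehension of blank-line indices is list.index("")
theorem pv_seps_head (xs : List String) (s : Int) :
    (((PySem.List.enumerate xs s).filter (fun p => p.2 == "")).map (fun p => p.1)).head? =
      (PySem.List.index? xs "").map (fun n => s + (n : Int)) := by
  induction xs generalizing s with
  | nil => simp [PySem.List.enumerate_nil, PySem.List.index?_eq_idxOf?]
  | cons x t ih =>
    rw [PySem.List.enumerate_cons]
    by_cases hx : x = ""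
    · subst hx
      rw [PySem.List.index?_cons_self]
      simp
    · rw [PySem.List.index?_cons_of_ne (v := "") (xs := t) hx]
      simp only [List.filter_cons]
      have hbe : ((s, x).2 == "") = false := by simpa using hx
      rw [hbe]
      simp only [if_false, Bool.false_eq_true]
      rw [ih (s+1)]
      cases h : PySem.List.index? t "" <;> simp <;> ring

-- contribution of one crate line to stack j, when its items are numbered from k
def pvRowC (items : List String) (k j : Nat) : List String :=
  match items[j - k]? with
  | some v => if k ≤ j ∧ v ≠ " " then [v] else []
  | none => []

theorem pv_appendAt_getElem? (st : List (List String)) (n : Nat) (v : String) (j : Nat) :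
    (pvAppendAt st n v)[j]? = if j = n then st[j]?.map (· ++ [v]) else st[j]? := by
  induction st generalizing n j with
  | nil => simp [pvAppendAt]
  | cons h t ih =>
    cases n with
    | zero =>
      cases j with
      | zero => simp [pvAppendAt]
      | succ j' => simp [pvAppendAt]
    | succ n' =>
      cases j with
      | zero => simp [pvAppendAt]
      | succ j' => simp [pvAppendAt, ih n']

theorem pv_rowC_cons (v : String) (rest : List String) (k j : Nat) :
    pvRowC (v :: rest) (k+1) j =
      (if j = k+1 ∧ v ≠ " " then [v] else []) ++ pvRowC rest (k+2) j := by
  unfold pvRowC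
  rcases Nat.lt_trichotomy j (k+1) with hlt | heq | hgt
  · have h1 : j - (k+1) = 0 := by omega
    have h2 : j - (k+2) = 0 := by omega
    rw [h1, h2]
    cases rest with
    | nil => simp [show ¬(j = k+1) by omega, show ¬(k+1 ≤ j) by omega]
    | cons r rs => simp [show ¬(j = k+1) by omega, show ¬(k+1 ≤ j) by omega, show ¬(k+2 ≤ j) by omega]
  · subst heq
    have h1 : (k+1) - (k+1) = 0 := by omega
    have h2 : (k+1) - (k+2) = 0 := by omega
    rw [h1, h2]
    cases rest with
    | nil => simp
    | cons r rs => simp [show ¬(k+2 ≤ k+1) by omega]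
  · have h1 : j - (k+1) = (j - (k+2)) + 1 := by omega
    rw [h1]
    simp only [List.getElem?_cons_succ]
    cases h : rest[j - (k+2)]? with
    | none => simp [show ¬(j = k+1) by omega]
    | some w => simp [show ¬(j = k+1) by omega, show k+1 ≤ j by omega, show k+2 ≤ j by omega]

-- one crate line of A's inner loop, seen through getElem?
theorem pv_fill_getElem? (items : List String) (st : List (List String)) (k : Nat) (j : Nat) :
    ((PySem.List.enumerate items (k : Int)).foldl (fun st p =>
        if p.2 ≠ " " then pvAppendAt st (p.1 + 1).toNat p.2 else st) st)[j]? =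
      st[j]?.map (· ++ pvRowC items (k+1) j) := by
  induction items generalizing st k with
  | nil =>
    rw [PySem.List.enumerate_nil]
    simp only [List.foldl_nil]
    cases h : st[j]? <;> simp [pvRowC]
  | cons v rest ih =>
    rw [PySem.List.enumerate_cons, List.foldl_cons]
    have hcast : ((k : Int) + 1) = (((k+1 : Nat)) : Int) := by push_cast; ring
    rw [hcast, ih _ (k+1)]
    rw [pv_rowC_cons]
    by_cases hv : v = " "
    · simp only [hv, ne_eq, not_true_eq_false, if_false, and_false, List.nil_append]
    · have hne : (v ≠ " ") = True := by simp [hv]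
      simp only [hne, if_true, and_true, Int.toNat_natCast]
      rw [pv_appendAt_getElem?]
      by_cases hj : j = k+1
      · subst hj
        cases h : st[k+1]? <;> simp
      · simp [hj]

-- A's whole crate loop, seen through getElem?
theorem pv_outer_getElem? (crates : List String) (st : List (List String)) (j : Nat) :
    (crates.foldl (fun st line =>
        (PySem.List.enumerate (pvItems line)).foldl (fun st p =>
          if p.2 ≠ " " then pvAppendAt st (p.1 + 1).toNat p.2 else st) st) st)[j]? =
      st[j]?.map (· ++ crates.flatMap (fun line => pvRowC (pvItems line) 1 j)) := by
  induction crates generalizing st with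
  | nil =>
    simp only [List.foldl_nil, List.flatMap_nil]
    cases h : st[j]? <;> simp
  | cons line t ih =>
    rw [List.foldl_cons, ih]
    have hfill := pv_fill_getElem? (pvItems line) st 0 j
    simp only [Nat.cast_zero, Nat.zero_add] at hfill
    rw [hfill, List.flatMap_cons]
    cases h : st[j]? <;> simp

theorem pv_items_getElem? (line : String) (k : Nat) :
    (pvItems line)[k]? =
      if (4 * (k : Int) + 1) < PySem.Str.len line
      then some (pvCharAt line (4 * (k : Int) + 1)) else none := by
  unfold pvItems
  rw [List.getElem?_map, PySem.List.pyRange_of_pos _ _ (by norm_num)]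
  rw [List.getElem?_map]
  have hlen : 0 ≤ PySem.Str.len line := by
    rw [PySem.Str.len_eq]; positivity
  set n := PySem.Str.len line with hn
  have hiff : (k < (if 1 < n then ((n - 1 + 4 - 1) / 4).toNat else 0)) ↔ (4 * (k : Int) + 1 < n) := by
    split <;> omega
  by_cases hk : 4 * (k : Int) + 1 < n
  · rw [List.getElem?_range (hiff.mpr hk), if_pos hk]
    have h14 : (1 + 4 * (k : Int)) = 4 * (k : Int) + 1 := by ring
    simp [h14]
  · rw [List.getElem?_eq_none (by simpa using fun h => hk (hiff.mp h)), if_neg hk]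
    rfl

theorem pv_single_eq_space (c : Char) : (String.ofList [c] = " ") ↔ c = ' ' := by
  constructor
  · intro h
    have := congrArg String.toList h
    simp at this
    simpa using this
  · intro h; subst h; decide

-- one cell of B's column comprehension is one line's contribution to stack k+1
theorem pv_cell_eq (line : String) (k : Nat) :
    (if (4 * (k : Int) + 1) < PySem.Str.len line then
        match PySem.Str.pyGet? line (4 * (k : Int) + 1) with
        | some c => if c ≠ ' ' then some (String.ofList [c]) else none
        | none => none
      else none).toList = pvRowC (pvItems line) 1 (k+1) := by
  unfold pvRowC
  have hsub : k + 1 - 1 = k := by omega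
  rw [hsub, pv_items_getElem?]
  by_cases hk : 4 * (k : Int) + 1 < PySem.Str.len line
  · rw [if_pos hk, if_pos hk]
    have hcast : (4 * (k : Int) + 1) = (((4 * k + 1 : Nat)) : Int) := by push_cast; ring
    have hlt : 4 * k + 1 < line.toList.length := by
      have := PySem.Str.len_eq line
      omega
    have hget : PySem.Str.pyGet? line (4 * (k : Int) + 1) = some (line.toList[4 * k + 1]) := by
      rw [hcast, PySem.Str.pyGet?_natCast, List.getElem?_eq_getElem hlt]
    rw [hget]
    unfold pvCharAt
    rw [hget]
    by_cases hc : line.toList[4 * k + 1] = ' '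
    · simp [hc, pv_single_eq_space]
    · simp [hc, pv_single_eq_space]
  · rw [if_neg hk, if_neg hk]
    rfl

theorem pv_filterMap_eq_flatMap {α β : Type} (f : α → Option β) (l : List α) :
    l.filterMap f = l.flatMap (fun x => (f x).toList) := by
  induction l with
  | nil => simp
  | cons x t ih =>
    rw [List.filterMap_cons, List.flatMap_cons, ← ih]
    cases f x <;> simp

theorem pv_column_eq (crates : List String) (k : Nat) :
    pvColumn crates (4 * (k : Int) + 1) =
      crates.flatMap (fun line => pvRowC (pvItems line) 1 (k+1)) := by
  unfold pvColumn
  rw [pv_filterMap_eq_flatMap]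
  simp only [pv_cell_eq]

theorem pv_rowC_zero (items : List String) : pvRowC items 1 0 = [] := by
  unfold pvRowC
  cases h : items[0 - 1]? <;> simp

-- writing distinct indices with List.set, seen through getElem?
theorem pv_foldl_set_getElem? (L : List Int) (g : Int → List String)
    (base : List (List String)) (j : Nat) (hL : ∀ k ∈ L, 0 ≤ k) :
    (L.foldl (fun st k => st.set k.toNat (g k)) base)[j]? =
      if (j : Int) ∈ L then (if j < base.length then some (g (j : Int)) else none)
      else base[j]? := by
  induction L generalizing base with
  | nil => simp
  | cons k0 rest ih =>
    rw [List.foldl_cons, ih _ (fun k hk => hL k (List.mem_cons_of_mem _ hk))]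
    have hk0 : 0 ≤ k0 := hL k0 List.mem_cons_self
    by_cases hjr : (j : Int) ∈ rest
    · simp [hjr, List.length_set]
    · by_cases hjk : (j : Int) = k0
      · have h0 : k0.toNat = j := by omega
        simp [hjr, hjk, List.getElem?_set, h0]
      · have h0 : k0.toNat ≠ j := by omega
        simp [hjr, hjk, List.getElem?_set, h0]

-- the fully filled stacks list equals B's column-by-column construction
theorem pv_stacks_eq (crates : List String) (m : Int) :
    (crates.foldl (fun st line =>
        (PySem.List.enumerate (pvItems line)).foldl (fun st p =>
          if p.2 ≠ " " then pvAppendAt st (p.1 + 1).toNat p.2 else st) st)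
      ((PySem.List.pyRange 0 (m + 1) 1).map (fun _ => ([] : List String)))) =
      (PySem.List.pyRange 1 (m + 1) 1).foldl
        (fun st k => st.set k.toNat (pvColumn crates (4 * k - 3)))
        ((PySem.List.pyRange 0 (m + 1) 1).map (fun _ => ([] : List String))) := by
  apply List.ext_getElem?
  intro j
  rw [pv_outer_getElem?]
  rw [pv_foldl_set_getElem? _ _ _ _ (by
    intro k hk
    rw [PySem.List.mem_pyRange_one] at hk
    omega)]
  have hbase : ((PySem.List.pyRange 0 (m + 1) 1).map (fun _ => ([] : List String)))[j]? =
      if j < (m + 1 - 0).toNat then some [] else none := by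
    rw [List.getElem?_map, PySem.List.getElem?_pyRange_one]
    split <;> rfl
  have hlen : ((PySem.List.pyRange 0 (m + 1) 1).map (fun _ => ([] : List String))).length =
      (m + 1 - 0).toNat := by
    rw [List.length_map, PySem.List.length_pyRange_one]
  rw [hbase, hlen]
  simp only [PySem.List.mem_pyRange_one]
  by_cases hin : 1 ≤ (j : Int) ∧ (j : Int) < m + 1
  · rw [if_pos hin, if_pos (by omega), if_pos (by omega)]
    obtain ⟨i, rfl⟩ : ∃ i : Nat, j = i + 1 := ⟨j - 1, by omega⟩
    have h43 : 4 * ((i + 1 : Nat) : Int) - 3 = 4 * (i : Int) + 1 := by push_cast; ring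
    rw [h43, pv_column_eq]
    simp
  · rw [if_neg hin]
    by_cases h0 : j < (m + 1 - 0).toNat
    · rw [if_pos h0]
      have hj0 : j = 0 := by omega
      subst hj0
      simp [pv_rowC_zero]
    · rw [if_neg h0]
      rfl

-- ===== VERDICT (by name: the statement is the Claim_ definition above) =====
theorem create_stacks_procedures_spec : Claim_equal_create_stacks_procedures := by
  intro data _hDom hPre
  unfold Spec_create_stacks_procedures create_stacks_procedures create_stacks_procedures_alt
  unfold Pre_create_stacks_procedures pvPre at hPre
  cases hsep : PySem.List.index? data "" with
  | none => simp only [hsep] at hPre; exact absurd hPre (by simp)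
  | some sep0 =>
    simp only [hsep] at hPre
    have h1 : PySem.List.pyGet?
        (((PySem.List.enumerate data).filter (fun p => p.2 == "")).map (fun p => p.1)) 0 =
        some ((sep0 : Int)) := by
      rw [PySem.List.pyGet?_zero, ← List.head?_eq_getElem?, pv_seps_head data 0, hsep]
      simp
    cases hnum : PySem.List.pyGet? data ((sep0 : Int) - 1) with
    | none => simp only [hnum] at hPre; exact absurd hPre (by simp)
    | some numline =>
      simp only [hnum] at hPre
      cases hints : (PySem.Str.split₀ numline).mapM PySem.Int.ofStr? with
      | none => simp only [hints] at hPre; exact absurd hPre (by simp)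
      | some nums =>
        simp only [hints] at hPre
        cases hmax : PySem.List.max? nums (fun x => x) with
        | none => simp only [hmax] at hPre; exact absurd hPre (by simp)
        | some m =>
          simp only [h1, hnum, hints, hmax]
          rw [pv_stacks_eq]
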